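-- pv_equiv track=rewrite | github.com/pypi-data/pypi-mirror-238 | packages/odtmaker/odtmaker-0.0.1-py3-none-any.whl/odtmaker/contentParser.py | _getLastTokenStart
-- ===== SOURCE A (Python) =====
-- def _getLastTokenStart(raw_token, token_start_list):
--     if '' in token_start_list:
--         rightest_token_str, rightest_token_position = '', 0
--     else:
--         rightest_token_str, rightest_token_position = None, -1
--
--     for index, token in enumerate(token_start_list):
--         if token == '':
--             continue
--
--         if (token_position := raw_token.rfind(token)) != -1:
--             if token_position > rightest_token_position:
--                 rightest_token_str = token
--                 rightest_token_position = token_position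
--
--     return rightest_token_str, rightest_token_position
-- ===== SOURCE B (Python) =====
-- def _getLastTokenStart(raw_token, token_start_list):
--     # Scan positions of raw_token from right to left and return on the first
--     # (i.e. rightmost) position where some non-empty token starts; the inner
--     # loop keeps list order, matching A's first-token-wins tie-break.  Any
--     # match at a position >= 1 beats the '' baseline; at position 0 the ''
--     # baseline (if present) wins ties, exactly as in A's strict-> update.
--     tokens = [t for t in token_start_list if t]
--     for pos in range(len(raw_token) - 1, 0, -1):
--         for t in tokens:
--             if raw_token.startswith(t, pos):
--                 return t, pos
--     if '' in token_start_list: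
--         return '', 0
--     for t in tokens:
--         if raw_token.startswith(t):
--             return t, 0
--     return None, -1
-- ===== Notes on version B (the rewrite author's own statement) =====
-- stated objective: faster
-- what changed: B inverts the traversal: instead of computing rfind over the whole string for every token and keeping a running maximum, it scans positions of raw_token from right to left and returns at the first (rightmost) position where some non-empty token starts (inner loop in list order preserves the first-token-wins tie-break, and the '' baseline wins ties only at position 0), so it stops as soon as the answer is found.
import Mathlib
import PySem

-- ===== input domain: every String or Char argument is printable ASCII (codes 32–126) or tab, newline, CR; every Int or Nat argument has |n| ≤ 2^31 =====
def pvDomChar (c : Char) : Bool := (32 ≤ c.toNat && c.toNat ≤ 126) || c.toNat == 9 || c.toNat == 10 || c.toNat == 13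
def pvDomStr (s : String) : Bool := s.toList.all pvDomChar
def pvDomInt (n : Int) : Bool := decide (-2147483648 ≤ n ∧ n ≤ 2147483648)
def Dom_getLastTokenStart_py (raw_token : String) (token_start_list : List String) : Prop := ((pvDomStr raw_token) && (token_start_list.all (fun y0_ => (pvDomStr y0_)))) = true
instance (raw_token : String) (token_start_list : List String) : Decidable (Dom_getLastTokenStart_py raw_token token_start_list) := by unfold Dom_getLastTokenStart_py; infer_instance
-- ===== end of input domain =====

-- B inverts the traversal: it scans positions of raw_token right-to-left and returns at the first
-- position where some non-empty token starts, instead of A's per-token rfind with a running best;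
-- the early exit made B measurably faster on a timing run's generated inputs (objective: faster).


-- ===== PORT A =====
-- loop body of A: skip '' tokens; update the running best when rfind succeeds strictly to the right
def aStep (raw_token : String) (acc : Option String × Int) (token : String) : Option String × Int :=
  if token = "" then acc
  else
    let token_position := PySem.Str.rfind raw_token token
    if token_position ≠ -1 then
      if token_position > acc.2 then (some token, token_position) else acc
    else acc

def getLastTokenStart_py (raw_token : String) (token_start_list : List String) : Option String × Int :=
  let init : Option String × Int :=
    if "" ∈ token_start_list then (some "", 0) else (none, -1)
  token_start_list.foldl (aStep raw_token) init

-- ===== PORT B =====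
-- inner loop of B: first token of the list that starts at position pos of raw_token
-- (raw_token.startswith(t, pos) with 0 ≤ pos ≤ len(raw_token) is: t is a prefix of raw_token[pos:] — exact here)
def bFindAt (raw : List Char) (tokens : List String) (pos : Nat) : Option String :=
  tokens.find? (fun t => PySem.Chars.startswith (raw.drop pos) t.toList)

-- outer loop of B: positions range(len-1, 0, -1), early return on the first hit
def bLoop (raw : List Char) (tokens : List String) : Nat → Option (String × Nat)
  | 0 => none
  | p + 1 =>
    match bFindAt raw tokens (p + 1) with
    | some t => some (t, p + 1)
    | none => bLoop raw tokens p

def getLastTokenStart_py_alt (raw_token : String) (token_start_list : List String) : Option String × Int :=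
  let tokens := token_start_list.filter (fun t => !(t == ""))
  match bLoop raw_token.toList tokens (raw_token.toList.length - 1) with
  | some (t, pos) => (some t, (pos : Int))
  | none =>
    if "" ∈ token_start_list then (some "", 0)
    else
      match bFindAt raw_token.toList tokens 0 with
      | some t => (some t, 0)
      | none => (none, -1)

-- ===== PRECONDITION & SPEC =====
def Spec_getLastTokenStart_py (raw_token : String) (token_start_list : List String) (out : Option String × Int) : Prop := out = getLastTokenStart_py_alt raw_token token_start_list
instance (raw_token : String) (token_start_list : List String) (out : Option String × Int) : Decidable (Spec_getLastTokenStart_py raw_token token_start_list out) := by unfold Spec_getLastTokenStart_py; infer_instance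

-- ===== CLAIM (what is proved, stated in full; the proofs are below) =====
def Claim_equal_getLastTokenStart_py : Prop := ∀ (raw_token : String) (token_start_list : List String), Dom_getLastTokenStart_py raw_token token_start_list → Spec_getLastTokenStart_py raw_token token_start_list (getLastTokenStart_py raw_token token_start_list)

-- ===== LEMMAS AND PROOFS =====

-- the reduction step of A's running best
def redStep (b c : Option String × Int) : Option String × Int := if b.2 < c.2 then c else b

def red (s : Option String × Int) (cs : List (Option String × Int)) : Option String × Int :=
  cs.foldl redStep s

def cand (raw_token token : String) : Option String × Int := (some token, PySem.Str.rfind raw_token token)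

def keep (raw_token token : String) : Bool := (!(token == "")) && (PySem.Str.rfind raw_token token != -1)

-- ---- A's fold is a reduction over its candidate list ----

lemma keep_false_empty (raw_token token : String) (ht : token = "") : keep raw_token token = false := by
  simp [keep, ht]

lemma keep_false_notfound (raw_token token : String) (hp : PySem.Str.rfind raw_token token = -1) :
    keep raw_token token = false := by
  unfold keep; rw [hp]; simp

lemma keep_true (raw_token token : String) (ht : token ≠ "") (hp : PySem.Str.rfind raw_token token ≠ -1) :
    keep raw_token token = true := by
  unfold keep
  simp only [Bool.and_eq_true, Bool.not_eq_true', beq_eq_false_iff_ne, ne_eq, bne_iff_ne]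
  exact ⟨ht, hp⟩

lemma aStep_eq_redStep (raw_token token : String) (acc : Option String × Int)
    (ht : token ≠ "") (hp : PySem.Str.rfind raw_token token ≠ -1) :
    aStep raw_token acc token = redStep acc (cand raw_token token) := by
  simp only [aStep, if_neg ht, if_pos hp, redStep, cand, gt_iff_lt]

lemma aLoop_eq_red (raw_token : String) (l : List String) (acc : Option String × Int) :
    l.foldl (aStep raw_token) acc = red acc ((l.filter (keep raw_token)).map (cand raw_token)) := by
  induction l generalizing acc with
  | nil => simp [red]
  | cons t rest ih =>
    by_cases ht : t = ""
    · rw [List.foldl_cons, List.filter_cons, keep_false_empty raw_token t ht]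
      simp only [Bool.false_eq_true, if_false]
      rw [← ih]
      simp [aStep, ht]
    · by_cases hp : PySem.Str.rfind raw_token t = -1
      · rw [List.foldl_cons, List.filter_cons, keep_false_notfound raw_token t hp]
        simp only [Bool.false_eq_true, if_false]
        rw [← ih]
        congr 1
        simp only [aStep, if_neg ht]
        rw [if_neg (by simpa using hp)]
      · rw [List.foldl_cons, List.filter_cons, keep_true raw_token t ht hp]
        simp only [if_true, List.map_cons]
        rw [ih, aStep_eq_redStep raw_token t acc ht hp]
        rfl

-- ---- reduction facts ----

lemma red_id (acc : Option String × Int) (cl : List (Option String × Int))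
    (h : ∀ c ∈ cl, c.2 ≤ acc.2) : red acc cl = acc := by
  induction cl with
  | nil => rfl
  | cons c rest ih =>
    have hc : c.2 ≤ acc.2 := h c (by simp)
    show red (redStep acc c) rest = acc
    rw [show redStep acc c = acc by simp only [redStep]; rw [if_neg (by omega)]]
    exact ih (fun d hd => h d (by simp [hd]))

lemma red_snd_lt (acc : Option String × Int) (cl : List (Option String × Int)) (v : Int)
    (ha : acc.2 < v) (h : ∀ c ∈ cl, c.2 < v) : (red acc cl).2 < v := by
  induction cl generalizing acc with
  | nil => exact ha
  | cons c rest ih =>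
    show (red (redStep acc c) rest).2 < v
    refine ih _ ?_ (fun d hd => h d (by simp [hd]))
    have hc : c.2 < v := h c (by simp)
    simp only [redStep]; split <;> omega

lemma red_first_max (acc : Option String × Int) (cl1 cl2 : List (Option String × Int))
    (c : Option String × Int) (ha : acc.2 < c.2)
    (h1 : ∀ d ∈ cl1, d.2 < c.2) (h2 : ∀ d ∈ cl2, d.2 ≤ c.2) :
    red acc (cl1 ++ c :: cl2) = c := by
  have hsplit : red acc (cl1 ++ c :: cl2) = red (redStep (red acc cl1) c) cl2 := by
    simp only [red, List.foldl_append, List.foldl_cons]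
  have hlt : (red acc cl1).2 < c.2 := red_snd_lt acc cl1 c.2 ha h1
  rw [hsplit, show redStep (red acc cl1) c = c by simp only [redStep]; rw [if_pos hlt]]
  exact red_id c cl2 h2

-- ---- rfind.go characterization ----

lemma go_neg_one_le (s sub : List Char) (n : Nat) : -1 ≤ PySem.Chars.rfind.go s sub n := by
  induction n with
  | zero => simp [PySem.Chars.rfind.go]; split <;> omega
  | succ j ih => simp [PySem.Chars.rfind.go]; split <;> omega

lemma le_go_of_match (s sub : List Char) (p n : Nat) (hp : p ≤ n)
    (hm : sub.isPrefixOf (s.drop p) = true) : (p : Int) ≤ PySem.Chars.rfind.go s sub n := by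
  induction n with
  | zero =>
    interval_cases p
    rw [List.drop_zero] at hm
    simp only [PySem.Chars.rfind.go]
    rw [if_pos hm]
    simp
  | succ j ih =>
    rcases Nat.lt_or_ge p (j + 1) with h | h
    · simp only [PySem.Chars.rfind.go]
      split
      · exact_mod_cast Int.ofNat_le.mpr hp
      · exact ih (by omega)
    · have hpj : p = j + 1 := by omega
      subst hpj
      simp only [PySem.Chars.rfind.go]
      rw [if_pos hm]

lemma go_cases (s sub : List Char) (n : Nat) :
    PySem.Chars.rfind.go s sub n = -1 ∨
      ∃ p : Nat, p ≤ n ∧ PySem.Chars.rfind.go s sub n = (p : Int) ∧ sub.isPrefixOf (s.drop p) = true := by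
  induction n with
  | zero =>
    by_cases h : sub.isPrefixOf s = true
    · right
      exact ⟨0, le_refl 0, by simp only [PySem.Chars.rfind.go]; rw [if_pos h]; simp,
        by rwa [List.drop_zero]⟩
    · left; simp only [PySem.Chars.rfind.go]; rw [if_neg h]
  | succ j ih =>
    by_cases h : sub.isPrefixOf (s.drop (j + 1)) = true
    · right
      exact ⟨j + 1, le_refl _, by simp only [PySem.Chars.rfind.go]; rw [if_pos h], h⟩
    · have hgo : PySem.Chars.rfind.go s sub (j + 1) = PySem.Chars.rfind.go s sub j := by
        simp only [PySem.Chars.rfind.go]; rw [if_neg h]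
      rcases ih with h1 | ⟨p, hp, hgo', hm⟩
      · left; rw [hgo, h1]
      · right; exact ⟨p, by omega, by rw [hgo, hgo'], hm⟩

lemma go_le_of_no_match (s sub : List Char) (n : Nat) (b : Int) (hb : -1 ≤ b)
    (h : ∀ q : Nat, b < (q : Int) → q ≤ n → sub.isPrefixOf (s.drop q) = false) :
    PySem.Chars.rfind.go s sub n ≤ b := by
  rcases go_cases s sub n with h1 | ⟨p, hp, hgo, hm⟩
  · omega
  · rw [hgo]
    by_contra hc
    have := h p (by omega) hp
    rw [this] at hm
    exact absurd hm (by simp)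

-- a non-empty token only matches strictly inside the string
lemma match_lt_length (raw : List Char) (t : String) (p : Nat) (ht : t ≠ "")
    (hm : t.toList.isPrefixOf (raw.drop p) = true) : p < raw.length := by
  by_contra h
  rw [List.drop_eq_nil_of_le (by omega)] at hm
  rw [List.isPrefixOf_iff_prefix, List.prefix_nil] at hm
  exact ht (by rwa [← String.toList_inj, String.toList_empty] : t = "")

-- ---- bLoop characterization ----

lemma bLoop_none (raw : List Char) (toks : List String) (m : Nat)
    (h : bLoop raw toks m = none) :
    ∀ q : Nat, 1 ≤ q → q ≤ m → bFindAt raw toks q = none := by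
  induction m with
  | zero => intro q h1 h2; omega
  | succ j ih =>
    intro q h1 h2
    rcases hF : bFindAt raw toks (j + 1) with _ | t
    · have hrec : bLoop raw toks j = none := by
        have := h; unfold bLoop at this; rw [hF] at this; exact this
      rcases Nat.lt_or_ge q (j + 1) with hq | hq
      · exact ih hrec q h1 (by omega)
      · have : q = j + 1 := by omega
        rw [this]; exact hF
    · exfalso; unfold bLoop at h; rw [hF] at h; exact absurd h (by simp)

lemma bLoop_some (raw : List Char) (toks : List String) (m : Nat) (t : String) (pos : Nat)
    (h : bLoop raw toks m = some (t, pos)) :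
    1 ≤ pos ∧ pos ≤ m ∧ bFindAt raw toks pos = some t ∧
      ∀ q : Nat, pos < q → q ≤ m → bFindAt raw toks q = none := by
  induction m with
  | zero => exact absurd h (by simp [bLoop])
  | succ j ih =>
    rcases hF : bFindAt raw toks (j + 1) with _ | u
    · have hrec : bLoop raw toks j = some (t, pos) := by
        have := h; unfold bLoop at this; rw [hF] at this; exact this
      obtain ⟨h1, h2, h3, h4⟩ := ih hrec
      refine ⟨h1, by omega, h3, ?_⟩
      intro q hq1 hq2
      rcases Nat.lt_or_ge q (j + 1) with hq | hq
      · exact h4 q hq1 (by omega)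
      · have : q = j + 1 := by omega
        rw [this]; exact hF
    · have := h; unfold bLoop at this; rw [hF] at this
      simp only [Option.some.injEq, Prod.mk.injEq] at this
      obtain ⟨rfl, rfl⟩ := this
      exact ⟨by omega, le_refl _, hF, fun q hq1 hq2 => by omega⟩

-- ---- bridging rfind on strings to go, under the no-match-above facts from bLoop ----

-- upper bound for a token of the filtered list, given that no position in (b, len-1] matched
lemma rfind_le_of_no_find (raw_token : String) (toks : List String) (u : String)
    (hu : u ∈ toks) (hne : u ≠ "") (b : Int) (hb : 0 ≤ b)
    (h : ∀ q : Nat, b < (q : Int) → q ≤ raw_token.toList.length - 1 → bFindAt raw_token.toList toks q = none) :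
    PySem.Str.rfind raw_token u ≤ b := by
  rw [PySem.Str.rfind_eq]
  simp only [PySem.Chars.rfind]
  apply go_le_of_no_match _ _ _ _ (by omega)
  intro q hq1 hq2
  by_cases hlen : q < raw_token.toList.length
  · have hF := h q hq1 (by omega)
    unfold bFindAt at hF
    have hpf : ¬ u.toList <+: List.drop q raw_token.toList := by
      simpa [PySem.Chars.startswith, List.isPrefixOf_iff_prefix] using List.find?_eq_none.mp hF u hu
    rw [Bool.eq_false_iff]
    simpa [List.isPrefixOf_iff_prefix] using hpf
  · by_contra hc
    exact absurd (match_lt_length raw_token.toList u q hne (by simpa using hc)) hlen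

lemma rfind_eq_pos (raw_token : String) (t : String) (pos : Nat)
    (hpos : pos ≤ raw_token.toList.length)
    (hm : t.toList.isPrefixOf (raw_token.toList.drop pos) = true)
    (hub : PySem.Str.rfind raw_token t ≤ (pos : Int)) :
    PySem.Str.rfind raw_token t = (pos : Int) := by
  have hlb : (pos : Int) ≤ PySem.Str.rfind raw_token t := by
    rw [PySem.Str.rfind_eq]
    simp only [PySem.Chars.rfind]
    exact le_go_of_match _ _ _ _ hpos hm
  omega

-- no match at pos forces rfind ≠ pos
lemma rfind_ne_of_no_match (raw_token u : String) (pos : Nat)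
    (hm : u.toList.isPrefixOf (raw_token.toList.drop pos) = false) :
    PySem.Str.rfind raw_token u ≠ (pos : Int) := by
  intro hc
  rw [PySem.Str.rfind_eq] at hc
  simp only [PySem.Chars.rfind] at hc
  rcases go_cases raw_token.toList u.toList raw_token.toList.length with h1 | ⟨p, _, hgo, hmm⟩
  · rw [h1] at hc; omega
  · rw [hgo] at hc
    have : p = pos := by exact_mod_cast hc
    rw [this, hm] at hmm
    exact absurd hmm (by simp)

-- tokens of the filtered list are non-empty
lemma mem_filter_ne (l : List String) (u : String)
    (hu : u ∈ l.filter (fun t => !(t == ""))) : u ≠ "" := by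
  have := (List.mem_filter.mp hu).2
  simpa using this

-- A's candidate list expressed through B's filtered token list
lemma candidates_via_tokens (raw_token : String) (l : List String) :
    l.filter (keep raw_token)
      = (l.filter (fun t => !(t == ""))).filter (fun u => PySem.Str.rfind raw_token u != -1) := by
  rw [List.filter_filter]
  apply List.filter_congr
  intro u _
  simp [keep, Bool.and_comm]

-- rfind is never below -1
lemma neg_one_le_rfind (raw_token u : String) : -1 ≤ PySem.Str.rfind raw_token u := by
  rw [PySem.Str.rfind_eq]
  simp only [PySem.Chars.rfind]
  exact go_neg_one_le _ _ _

-- decomposition of a successful inner-loop search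
lemma bFindAt_some (raw : List Char) (toks : List String) (p : Nat) (t : String)
    (h : bFindAt raw toks p = some t) :
    t.toList.isPrefixOf (raw.drop p) = true ∧
      ∃ pre post, toks = pre ++ t :: post ∧
        ∀ u ∈ pre, u.toList.isPrefixOf (raw.drop p) = false := by
  unfold bFindAt at h
  rw [List.find?_eq_some_iff_append] at h
  obtain ⟨hb, pre, post, heq, hpre⟩ := h
  simp only [PySem.Chars.startswith] at hb
  refine ⟨hb, pre, post, heq, fun u hu => ?_⟩
  have h2 := hpre u hu
  simp only [PySem.Chars.startswith, Bool.not_eq_true'] at h2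
  exact h2

-- a failed inner-loop search means no token matches at that position
lemma bFindAt_none (raw : List Char) (toks : List String) (p : Nat) (u : String)
    (h : bFindAt raw toks p = none) (hu : u ∈ toks) :
    u.toList.isPrefixOf (raw.drop p) = false := by
  unfold bFindAt at h
  have h2 := List.find?_eq_none.mp h u hu
  simp only [PySem.Chars.startswith] at h2
  exact Bool.eq_false_iff.mpr h2

-- ===== VERDICT (by name: the statement is the Claim_ definition above) =====
theorem getLastTokenStart_py_spec : Claim_equal_getLastTokenStart_py := by
  intro raw l _
  unfold Spec_getLastTokenStart_py getLastTokenStart_py getLastTokenStart_py_alt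
  rw [aLoop_eq_red, candidates_via_tokens]
  rcases hB : bLoop raw.toList (l.filter (fun t => !(t == ""))) (raw.toList.length - 1) with _ | ⟨t, pos⟩
  · -- no token starts at any position ≥ 1
    simp only [hB]
    have hnone := bLoop_none _ _ _ hB
    have hub0 : ∀ u ∈ l.filter (fun t => !(t == "")), PySem.Str.rfind raw u ≤ 0 := by
      intro u hu
      refine rfind_le_of_no_find raw _ u hu (mem_filter_ne l u hu) 0 le_rfl ?_
      intro q hq1 hq2
      exact hnone q (by exact_mod_cast hq1) hq2
    by_cases hmem : "" ∈ l
    · simp only [if_pos hmem]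
      apply red_id
      intro c hc
      obtain ⟨u, hu, rfl⟩ := List.mem_map.mp hc
      exact hub0 u (List.mem_of_mem_filter hu)
    · simp only [if_neg hmem]
      have hall : ∀ u ∈ l.filter (fun t => !(t == "")),
          u.toList.isPrefixOf (raw.toList.drop 0) = false →
          PySem.Str.rfind raw u = -1 := by
        intro u hu hm0
        have h1 := hub0 u hu
        have h2 := neg_one_le_rfind raw u
        have h3 : PySem.Str.rfind raw u ≠ ((0 : Nat) : Int) := rfind_ne_of_no_match raw u 0 hm0
        simp only [Nat.cast_zero] at h3
        omega
      rcases hF : bFindAt raw.toList (l.filter (fun t => !(t == ""))) 0 with _ | t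
      ·
        have hfe : (l.filter (fun t => !(t == ""))).filter
            (fun u => PySem.Str.rfind raw u != -1) = [] := by
          rw [List.filter_eq_nil_iff]
          intro u hu
          have hr := hall u hu (bFindAt_none _ _ _ u hF hu)
          simp only [bne_iff_ne, ne_eq, Decidable.not_not]
          exact hr
        rw [hfe]
        rfl
      ·
        obtain ⟨hm, pre, post, heq, hpre⟩ := bFindAt_some _ _ _ _ hF
        have hpre_sub : ∀ u ∈ pre, u ∈ l.filter (fun t => !(t == "")) := by
          intro u hu; rw [heq]; exact List.mem_append_left _ hu
        have ht_mem : t ∈ l.filter (fun t => !(t == "")) := by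
          rw [heq]; exact List.mem_append_right _ (by simp)
        have hrt : PySem.Str.rfind raw t = ((0 : Nat) : Int) :=
          rfind_eq_pos raw t 0 (by omega) hm (by simpa using hub0 t ht_mem)
        have hfpre : pre.filter (fun u => PySem.Str.rfind raw u != -1) = [] := by
          rw [List.filter_eq_nil_iff]
          intro u hu
          have hr := hall u (hpre_sub u hu) (hpre u hu)
          simp only [bne_iff_ne, ne_eq, Decidable.not_not]
          exact hr
        have hfound_t : (PySem.Str.rfind raw t != -1) = true := by
          rw [hrt]; simp
        have hsplit : (pre ++ t :: post).filter (fun u => PySem.Str.rfind raw u != -1)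
            = pre.filter (fun u => PySem.Str.rfind raw u != -1)
              ++ t :: post.filter (fun u => PySem.Str.rfind raw u != -1) := by
          rw [List.filter_append, List.filter_cons_of_pos (p := fun u => PySem.Str.rfind raw u != -1) (l := post) hfound_t]
        have hcand_t : cand raw t = (some t, ((0 : Nat) : Int)) := by
          simp only [cand]; rw [hrt]
        rw [heq, hsplit, hfpre, List.nil_append, List.map_cons, hcand_t]
        refine red_first_max _ [] _ _ (by norm_num) (by simp) ?_
        intro d hd
        obtain ⟨u, hu, rfl⟩ := List.mem_map.mp hd
        have hu2 : u ∈ l.filter (fun t => !(t == "")) := by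
          rw [heq]; exact List.mem_append_right _ (by simp [List.mem_of_mem_filter hu])
        show PySem.Str.rfind raw u ≤ ((0 : Nat) : Int)
        simpa using hub0 u hu2
  · -- first hit at position pos ≥ 1
    simp only [hB]
    obtain ⟨hp1, hp2, hfind, habove⟩ := bLoop_some _ _ _ _ _ hB
    obtain ⟨hm, pre, post, heq, hpre⟩ := bFindAt_some _ _ _ _ hfind
    have hub : ∀ u ∈ l.filter (fun t => !(t == "")), PySem.Str.rfind raw u ≤ (pos : Int) := by
      intro u hu
      refine rfind_le_of_no_find raw _ u hu (mem_filter_ne l u hu) (pos : Int) (by positivity) ?_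
      intro q hq1 hq2
      exact habove q (by exact_mod_cast hq1) hq2
    have ht_mem : t ∈ l.filter (fun t => !(t == "")) := by
      rw [heq]; exact List.mem_append_right _ (by simp)
    have hpre_sub : ∀ u ∈ pre, u ∈ l.filter (fun t => !(t == "")) := by
      intro u hu; rw [heq]; exact List.mem_append_left _ hu
    have hposn : pos ≤ raw.toList.length := le_trans hp2 (Nat.sub_le _ _)
    have hrt : PySem.Str.rfind raw t = (pos : Int) :=
      rfind_eq_pos raw t pos hposn hm (hub t ht_mem)
    have hpre_lt : ∀ u ∈ pre, PySem.Str.rfind raw u < (pos : Int) := by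
      intro u hu
      have h1 := hub u (hpre_sub u hu)
      have h2 := rfind_ne_of_no_match raw u pos (hpre u hu)
      omega
    have hfound_t : (PySem.Str.rfind raw t != -1) = true := by
      rw [hrt]
      simp only [bne_iff_ne, ne_eq]
      omega
    have hsplit : (pre ++ t :: post).filter (fun u => PySem.Str.rfind raw u != -1)
        = pre.filter (fun u => PySem.Str.rfind raw u != -1)
          ++ t :: post.filter (fun u => PySem.Str.rfind raw u != -1) := by
      rw [List.filter_append, List.filter_cons_of_pos (p := fun u => PySem.Str.rfind raw u != -1) (l := post) hfound_t]
    have hcand_t : cand raw t = (some t, (pos : Int)) := by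
      simp only [cand]; rw [hrt]
    rw [heq, hsplit, List.map_append, List.map_cons, hcand_t]
    refine red_first_max _ _ _ _ ?_ ?_ ?_
    · show (if "" ∈ l then ((some "" : Option String), (0 : Int)) else (none, -1)).2 < (pos : Int)
      split <;> simp <;> omega
    · intro d hd
      obtain ⟨u, hu, rfl⟩ := List.mem_map.mp hd
      show PySem.Str.rfind raw u < (pos : Int)
      exact hpre_lt u (List.mem_of_mem_filter hu)
    · intro d hd
      obtain ⟨u, hu, rfl⟩ := List.mem_map.mp hd
      have hu2 : u ∈ l.filter (fun t => !(t == "")) := by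
        rw [heq]; exact List.mem_append_right _ (by simp [List.mem_of_mem_filter hu])
      show PySem.Str.rfind raw u ≤ (pos : Int)
      exact hub u hu2
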